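-- pv_equiv track=rewrite | github.com/dijiahU/pipeline | safety_pipeline/runtime.py | group_experience_cases
-- ===== SOURCE A (Python) =====
-- def group_experience_cases(cases):
--     sessions = []
--     current_session = []
--     previous_step_index = None
--
--     for case in cases:
--         step_index = case.get("step_index", 0)
--         if current_session and previous_step_index is not None and step_index <= previous_step_index:
--             sessions.append(current_session)
--             current_session = []
--         current_session.append(case)
--         previous_step_index = step_index
--
--     if current_session:
--         sessions.append(current_session)
--     return sessions
-- ===== SOURCE B (Python) =====
-- def group_experience_cases(cases):
--     # Same grouping, different decomposition: repeatedly split off the maximal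
--     # strictly-increasing run from the front instead of threading an accumulator.
--     def step(c):
--         return c.get("step_index", 0)
--
--     def take_run(prev, xs):
--         run = []
--         while xs and step(xs[0]) > prev:
--             prev = step(xs[0])
--             run.append(xs[0])
--             xs = xs[1:]
--         return run, xs
--
--     sessions = []
--     rest = cases
--     while rest:
--         run, tail = take_run(step(rest[0]), rest[1:])
--         sessions.append([rest[0]] + run)
--         rest = tail
--     return sessions
-- ===== Notes on version B (the rewrite author's own statement) =====
-- stated objective: alternative
-- what changed: Instead of threading a (sessions, current_session, previous_step_index) accumulator through one loop with a post-loop flush, B repeatedly splits off the maximal strictly-increasing run from the front of the list and appends each run as a session.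
import Mathlib
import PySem

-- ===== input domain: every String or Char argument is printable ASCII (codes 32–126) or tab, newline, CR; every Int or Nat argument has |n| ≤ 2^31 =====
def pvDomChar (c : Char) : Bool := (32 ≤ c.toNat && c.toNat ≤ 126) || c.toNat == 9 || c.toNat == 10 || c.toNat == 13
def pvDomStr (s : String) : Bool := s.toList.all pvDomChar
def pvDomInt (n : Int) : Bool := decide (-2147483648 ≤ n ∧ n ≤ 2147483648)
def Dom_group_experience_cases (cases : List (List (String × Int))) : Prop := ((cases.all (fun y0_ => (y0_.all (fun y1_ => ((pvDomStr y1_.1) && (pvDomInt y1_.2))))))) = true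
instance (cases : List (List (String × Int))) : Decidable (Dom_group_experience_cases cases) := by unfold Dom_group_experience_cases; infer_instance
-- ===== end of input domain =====

-- B groups the cases by repeatedly splitting off the maximal strictly-increasing run
-- from the front (no accumulator threading); same return value as A, objective: alternative decomposition.

-- case.get("step_index", 0)
def gecStep (case : List (String × Int)) : Int := (case.lookup "step_index").getD 0   -- first-match assoc-list lookup = Python dict .get

-- ===== PORT A =====
-- the for-loop of A, state = (sessions, current_session, previous_step_index)
def gecLoop : List (List (String × Int)) → List (List (List (String × Int))) →
    List (List (String × Int)) → Option Int →
    (List (List (List (String × Int))) × List (List (String × Int)))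
  | [], sessions, current, _ => (sessions, current)
  | c :: cs, sessions, current, prev =>
    let s := gecStep c
    if (!current.isEmpty) && (match prev with | some p => decide (s ≤ p) | none => false) then
      gecLoop cs (sessions ++ [current]) ([] ++ [c]) (some s)
    else
      gecLoop cs sessions (current ++ [c]) (some s)

def group_experience_cases (cases : List (List (String × Int))) : List (List (List (String × Int))) :=
  let st := gecLoop cases [] [] none
  if !st.2.isEmpty then st.1 ++ [st.2] else st.1

-- ===== PORT B =====
-- take_run of B: peel the cases that strictly increase past prev, return (run, rest)
def gecTakeRun : Int → List (List (String × Int)) →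
    (List (List (String × Int)) × List (List (String × Int)))
  | _, [] => ([], [])
  | prev, c :: cs =>
    if gecStep c > prev then
      let pr := gecTakeRun (gecStep c) cs
      (c :: pr.1, pr.2)
    else ([], c :: cs)

theorem gecTakeRun_rest_length (p : Int) (cs : List (List (String × Int))) :
    (gecTakeRun p cs).2.length ≤ cs.length := by
  induction cs generalizing p with
  | nil => simp [gecTakeRun]
  | cons c cs ih =>
    simp only [gecTakeRun]
    split
    · exact Nat.le_succ_of_le (ih _)
    · simp

def group_experience_cases_alt : List (List (String × Int)) → List (List (List (String × Int)))
  | [] => []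
  | c :: cs =>
    let pr := gecTakeRun (gecStep c) cs
    (c :: pr.1) :: group_experience_cases_alt pr.2
  termination_by cases => cases.length
  decreasing_by simpa using Nat.lt_succ_of_le (gecTakeRun_rest_length _ _)

-- ===== PRECONDITION & SPEC =====
def Spec_group_experience_cases (cases : List (List (String × Int))) (out : List (List (List (String × Int)))) : Prop := out = group_experience_cases_alt cases
instance (cases : List (List (String × Int))) (out : List (List (List (String × Int)))) : Decidable (Spec_group_experience_cases cases out) := by unfold Spec_group_experience_cases; infer_instance

-- ===== CLAIM (what is proved, stated in full; the proofs are below) =====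
def Claim_equal_group_experience_cases : Prop := ∀ (cases : List (List (String × Int))), Dom_group_experience_cases cases → Spec_group_experience_cases cases (group_experience_cases cases)

-- ===== LEMMAS AND PROOFS =====

-- A's post-loop flush
def gecFinish (st : List (List (List (String × Int))) × List (List (String × Int))) :
    List (List (List (String × Int))) :=
  if !st.2.isEmpty then st.1 ++ [st.2] else st.1

theorem gecLoop_run (cs : List (List (String × Int))) :
    ∀ (S : List (List (List (String × Int)))) (C : List (String × Int))
      (Cs : List (List (String × Int))) (p : Int),
    gecFinish (gecLoop cs S (C :: Cs) (some p)) =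
      S ++ ((C :: Cs) ++ (gecTakeRun p cs).1) :: group_experience_cases_alt (gecTakeRun p cs).2 := by
  induction cs with
  | nil =>
    intro S C Cs p
    simp [gecLoop, gecFinish, gecTakeRun, group_experience_cases_alt]
  | cons c cs ih =>
    intro S C Cs p
    by_cases h : gecStep c ≤ p
    · have hng : ¬ gecStep c > p := not_lt.mpr h
      simp only [gecLoop, gecTakeRun, hng, List.isEmpty_cons, h, decide_true,
        Bool.not_false, Bool.true_and, if_true, if_false, List.nil_append,
        Bool.false_eq_true, Bool.true_eq_false, ite_false, ite_true]
      rw [ih (S ++ [C :: Cs]) c [] (gecStep c)]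
      simp [group_experience_cases_alt]
    · have hg : gecStep c > p := lt_of_not_ge h
      simp only [gecLoop, gecTakeRun, hg, if_pos, List.isEmpty_cons, h, decide_false,
        Bool.and_false, Bool.false_eq_true, ite_false, List.cons_append]
      rw [ih S C (Cs ++ [c]) (gecStep c)]
      simp

theorem gec_eq (cases : List (List (String × Int))) :
    group_experience_cases cases = group_experience_cases_alt cases := by
  cases cases with
  | nil => simp [group_experience_cases, gecLoop, group_experience_cases_alt]
  | cons c cs =>
    show gecFinish (gecLoop (c :: cs) [] [] none) = _
    simp only [gecLoop, List.isEmpty_nil, Bool.not_true, Bool.false_and,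
      Bool.false_eq_true, ite_false, List.nil_append]
    rw [gecLoop_run cs [] c [] (gecStep c)]
    simp [group_experience_cases_alt]

-- ===== VERDICT (by name: the statement is the Claim_ definition above) =====
theorem group_experience_cases_spec : Claim_equal_group_experience_cases := by
  intro cases _
  unfold Spec_group_experience_cases
  exact gec_eq cases
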